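-- pv_equiv track=rewrite | github.com/deme-12/GOA-Homeworks | level 33/homework/homework06.py | kebabize
-- ===== SOURCE A (Python) =====
-- def kebabize(st):
--     result = ""
--     for char in st:
--         if char.isalpha():
--             if char.isupper():
--                 result += "-" + char.lower()
--             else:
--                 result += char
--     if len(result) > 0 and result[0] == "-":
--         return result[1:]
--     return result
-- ===== SOURCE B (Python) =====
-- def kebabize(st):
--     words = []
--     cur = []
--     for char in st:
--         if char.isalpha():
--             if char.isupper():
--                 if cur:
--                     words.append(''.join(cur))
--                 cur = [char.lower()]
--             else:
--                 cur.append(char)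
--     if cur:
--         words.append(''.join(cur))
--     return '-'.join(words)
-- ===== Notes on version B (the rewrite author's own statement) =====
-- stated objective: simpler
-- what changed: B collects word segments in one pass (starting a new segment at each uppercase letter, lowering only that boundary character) and joins them with a dash separator, so A's sentinel leading dash and its final strip disappear.
import Mathlib
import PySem

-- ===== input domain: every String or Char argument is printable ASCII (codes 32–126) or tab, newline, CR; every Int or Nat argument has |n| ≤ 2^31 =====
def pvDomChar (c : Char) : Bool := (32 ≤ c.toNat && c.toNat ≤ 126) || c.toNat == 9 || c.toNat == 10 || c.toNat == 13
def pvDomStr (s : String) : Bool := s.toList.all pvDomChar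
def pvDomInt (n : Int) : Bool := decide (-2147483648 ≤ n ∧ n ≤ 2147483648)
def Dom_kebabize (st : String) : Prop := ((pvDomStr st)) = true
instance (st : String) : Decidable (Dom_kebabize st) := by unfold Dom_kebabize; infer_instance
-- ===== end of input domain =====

-- B collects word segments (lowering only the uppercase boundary char) and joins them with '-',
-- so A's sentinel leading dash and its final strip disappear (objective: simpler).

-- ===== PORT A =====
-- one loop step of A: append "-"+char.lower() for an uppercase letter, the char itself for
-- another letter, nothing otherwise (the result string kept as a character list)
def kebabizeStepA (r : List Char) (c : Char) : List Char :=
  if PySem.Chars.isalpha c then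
    if PySem.Chars.isupper c then r ++ ['-', PySem.Chars.lowerChar c]
    else r ++ [c]
  else r

def kebabize (st : String) : String :=
  let result := st.toList.foldl kebabizeStepA []
  -- if len(result) > 0 and result[0] == "-": return result[1:]
  match result with
  | '-' :: rest => String.ofList rest
  | _ => String.ofList result

-- ===== PORT B =====
-- one loop step of B over the state (words, cur); cur is the current segment with its
-- characters kept most-recent-first (appending a char = consing it)
def kebabizeStepB (p : List (List Char) × List Char) (c : Char) : List (List Char) × List Char :=
  if PySem.Chars.isalpha c then
    if PySem.Chars.isupper c then
      ((if p.2 = [] then p.1 else p.1 ++ [p.2.reverse]), [PySem.Chars.lowerChar c])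
    else (p.1, c :: p.2)
  else p

-- hand-port of "-".join over character lists (exact for join with a one-char separator)
def joinDash : List (List Char) → List Char
  | [] => []
  | [w] => w
  | w :: ws => w ++ '-' :: joinDash ws

def kebabize_alt (st : String) : String :=
  let p := st.toList.foldl kebabizeStepB ([], [])
  let words := if p.2 = [] then p.1 else p.1 ++ [p.2.reverse]
  String.ofList (joinDash words)

-- ===== PRECONDITION & SPEC =====
def Spec_kebabize (st : String) (out : String) : Prop := out = kebabize_alt st
instance (st : String) (out : String) : Decidable (Spec_kebabize st out) := by unfold Spec_kebabize; infer_instance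

-- ===== CLAIM (what is proved, stated in full; the proofs are below) =====
def Claim_equal_kebabize : Prop := ∀ (st : String), Dom_kebabize st → Spec_kebabize st (kebabize st)

-- ===== LEMMAS AND PROOFS =====

-- A's final leading-dash strip, as a function on character lists
def stripDash : List Char → List Char
  | [] => []
  | a :: t => if a = '-' then t else a :: t

-- the pending segment, rendered as the (possibly empty) tail of the word list
def curPart (cur : List Char) : List (List Char) :=
  if cur = [] then [] else [cur.reverse]

lemma stripDash_append (r x : List Char) (h : r ≠ []) :
    stripDash (r ++ x) = stripDash r ++ x := by
  cases r with
  | nil => exact absurd rfl h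
  | cons a t =>
    simp only [List.cons_append, stripDash]
    split_ifs <;> simp

lemma joinDash_snoc (l : List (List Char)) (x : List Char) :
    joinDash (l ++ [x]) = if l = [] then x else joinDash l ++ '-' :: x := by
  induction l with
  | nil => simp [joinDash]
  | cons a t ih =>
    cases t with
    | nil => simp [joinDash]
    | cons b u =>
      have h1 : joinDash ((a :: b :: u) ++ [x]) = a ++ '-' :: joinDash ((b :: u) ++ [x]) := rfl
      rw [h1, ih]
      simp [joinDash]

lemma joinDash_snoc_append (l : List (List Char)) (x y : List Char) :
    joinDash (l ++ [x ++ y]) = joinDash (l ++ [x]) ++ y := by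
  rw [joinDash_snoc, joinDash_snoc]
  split_ifs <;> simp

-- loop invariant: A's stripped result equals B's rendered state; they are empty together,
-- and a flushed word can only exist once a segment has been started
lemma inv (l : List Char) :
    ∀ (r : List Char) (ws : List (List Char)) (cur : List Char),
      stripDash r = joinDash (ws ++ curPart cur) →
      (r = [] ↔ cur = []) → (cur = [] → ws = []) →
      stripDash (l.foldl kebabizeStepA r)
        = joinDash ((l.foldl kebabizeStepB (ws, cur)).1
            ++ curPart ((l.foldl kebabizeStepB (ws, cur)).2)) := by
  induction l with
  | nil => intro r ws cur h _ _; simpa using h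
  | cons c t ih =>
    intro r ws cur h hiff hflush
    simp only [List.foldl_cons]
    by_cases h1 : PySem.Chars.isalpha c = true
    · by_cases h2 : PySem.Chars.isupper c = true
      · -- uppercase: flush the segment, start a new one
        rw [show kebabizeStepA r c = r ++ ['-', PySem.Chars.lowerChar c] from by
          simp [kebabizeStepA, h1, h2]]
        by_cases hcur : cur = []
        · have hws := hflush hcur
          have hr := hiff.mpr hcur
          rw [show kebabizeStepB (ws, cur) c = ([], [PySem.Chars.lowerChar c]) from by
            simp [kebabizeStepB, h1, h2, hcur, hws]]
          refine ih _ _ _ ?_ (by simp [hr]) (by simp)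
          simp [hr, stripDash, curPart, joinDash]
        · have hr : r ≠ [] := fun h' => hcur (hiff.mp h')
          have h' : stripDash r = joinDash (ws ++ [cur.reverse]) := by
            simpa [curPart, hcur] using h
          rw [show kebabizeStepB (ws, cur) c
              = (ws ++ [cur.reverse], [PySem.Chars.lowerChar c]) from by
            simp [kebabizeStepB, h1, h2, hcur]]
          refine ih _ _ _ ?_ (by simp) (by simp)
          rw [stripDash_append _ _ hr, h']
          have hne : ws ++ [cur.reverse] ≠ [] := by simp
          simp only [curPart,
            if_neg (show ¬([PySem.Chars.lowerChar c] = ([] : List Char)) by simp),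
            List.reverse_singleton, joinDash_snoc, if_neg hne]
      · -- other letter: extend the segment
        rw [show kebabizeStepA r c = r ++ [c] from by simp [kebabizeStepA, h1, h2],
            show kebabizeStepB (ws, cur) c = (ws, c :: cur) from by
              simp [kebabizeStepB, h1, h2]]
        by_cases hcur : cur = []
        · have hws := hflush hcur
          have hr := hiff.mpr hcur
          have hc : c ≠ '-' := by
            intro h'; subst h'; exact absurd h1 (by decide)
          refine ih _ _ _ ?_ (by simp [hr]) (by simp)
          simp [hr, hws, hcur, stripDash, hc, curPart, joinDash]
        · have hr : r ≠ [] := fun h' => hcur (hiff.mp h')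
          have h' : stripDash r = joinDash (ws ++ [cur.reverse]) := by
            simpa [curPart, hcur] using h
          refine ih _ _ _ ?_ (by simp [hr]) (by simp)
          rw [stripDash_append _ _ hr, h']
          simp only [curPart,
            if_neg (show ¬((c :: cur) = ([] : List Char)) by simp), List.reverse_cons]
          exact (joinDash_snoc_append ws cur.reverse [c]).symm
    · rw [show kebabizeStepA r c = r from by simp [kebabizeStepA, h1],
          show kebabizeStepB (ws, cur) c = (ws, cur) from by simp [kebabizeStepB, h1]]
      exact ih _ _ _ h hiff hflush

-- ===== VERDICT (by name: the statement is the Claim_ definition above) =====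
theorem kebabize_spec : Claim_equal_kebabize := by
  intro st _
  unfold Spec_kebabize kebabize kebabize_alt
  have h := inv st.toList [] [] [] (by simp [stripDash, curPart, joinDash]) (by simp) (by simp)
  have hmk : ∀ r : List Char,
      (match r with
        | '-' :: rest => String.ofList rest
        | _ => String.ofList r) = String.ofList (stripDash r) := by
    intro r
    split
    · next rest => simp [stripDash]
    · next hne =>
      cases r with
      | nil => simp [stripDash]
      | cons a t =>
        have ha : a ≠ '-' := by
          intro h'; subst h'; exact hne t rfl
        simp [stripDash, ha]
  have hcp : ∀ (q : List (List Char) × List Char),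
      (if q.2 = [] then q.1 else q.1 ++ [q.2.reverse]) = q.1 ++ curPart q.2 := by
    intro q
    by_cases hq : q.2 = [] <;> simp [curPart, hq]
  simp only [hmk, h, hcp]
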